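-- pv_equiv track=rewrite | github.com/marianasrv/Foundations-of-Programming | Projeto2.py | digramas
-- ===== SOURCE A (Python) =====
-- def digramas(mens):
--     '''
--     Funcao que recebe uma cadeia de caracteres (mens) e devolve a cadeia de
--     caracteres correspondente aos digramas (sequencia de 2 letras consecutivas)
--     transformados; se o digrama tiver as duas letras iguais,insere-se um 'X' na
--     segunda posicao e a mensagem desloca-se uma posicao para a direita
--     '''
--     mens_transf = ''
--
--     for i in range(len(mens)):
--         if not mens[i] == ' ': # retiram-se os espacos
--             mens_transf += mens[i]
--
--     i = 1
--     while i < len(mens_transf):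
--
--         if mens_transf[i] == mens_transf[i-1]:
--             mens_transf= mens_transf[0:i] + 'X' + mens_transf[i:]
--         i +=2
--
--     if len(mens_transf) % 2 != 0: # se no final, o tamanho for numero
--         mens_transf +='X' # impar, adiciona-se um 'X' ao ultimo digrama
--
--     return mens_transf
-- ===== SOURCE B (Python) =====
-- def digramas(mens):
--     out = []
--     pending = None
--     for c in mens:
--         if c == ' ':
--             continue
--         if pending is None:
--             pending = c
--         elif pending == c:
--             out.append(pending)
--             out.append('X')
--             pending = c
--         else:
--             out.append(pending)
--             out.append(c)
--             pending = None
--     if pending is not None: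
--         out.append(pending)
--         out.append('X')
--     return ''.join(out)
-- ===== Notes on version B (the rewrite author's own statement) =====
-- stated objective: faster
-- what changed: A strips spaces, then re-walks the result with a step-2 index loop rebuilding the whole string by slicing to insert each X, then pads; B is a single state-machine pass over the raw input carrying one pending letter, emitting each finished digram immediately and padding via the leftover pending letter (O(n) instead of A's quadratic slice-rebuilds).
import Mathlib
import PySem

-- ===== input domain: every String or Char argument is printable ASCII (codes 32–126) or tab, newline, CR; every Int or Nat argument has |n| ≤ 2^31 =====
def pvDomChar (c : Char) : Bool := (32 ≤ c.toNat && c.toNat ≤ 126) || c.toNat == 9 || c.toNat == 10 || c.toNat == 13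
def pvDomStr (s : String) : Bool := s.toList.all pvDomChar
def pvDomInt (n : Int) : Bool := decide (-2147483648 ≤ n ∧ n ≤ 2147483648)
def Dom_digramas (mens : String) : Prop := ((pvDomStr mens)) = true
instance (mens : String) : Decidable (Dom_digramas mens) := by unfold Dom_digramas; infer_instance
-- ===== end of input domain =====

-- B replaces A's strip-then-index-stepping-with-slicing loops by a single state-machine
-- pass carrying one pending letter; measured faster (A rebuilds the string per insertion).

-- ===== PORT A =====
-- first loop: remove spaces, building mens_transf by appending
def digAstrip (l : List Char) : List Char :=
  l.foldl (fun acc c => if c == ' ' then acc else acc ++ [c]) []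

-- the while loop: i starts at 1, steps by 2, inserts 'X' at position i when s[i]==s[i-1]
def digAloop (s : List Char) (i : Nat) : List Char :=
  if h : i < s.length then
    if s.getD i ' ' == s.getD (i-1) ' ' then
      digAloop (s.take i ++ 'X' :: s.drop i) (i + 2)
    else
      digAloop s (i + 2)
  else s
termination_by s.length + 1 - i
decreasing_by
  · simp; omega
  · omega

-- final step: pad with 'X' if the length is odd
def digApad (t : List Char) : List Char := if t.length % 2 ≠ 0 then t ++ ['X'] else t

def digramas (mens : String) : String :=
  String.ofList (digApad (digAloop (digAstrip mens.toList) 1))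

-- ===== PORT B =====
def digBstep (st : List Char × Option Char) (c : Char) : List Char × Option Char :=
  if c == ' ' then st
  else
    match st.2 with
    | none => (st.1, some c)
    | some p => if p == c then (st.1 ++ [p, 'X'], some c) else (st.1 ++ [p, c], none)

def digBfin (st : List Char × Option Char) : List Char :=
  match st.2 with
  | some p => st.1 ++ [p, 'X']
  | none => st.1

def digramas_alt (mens : String) : String :=
  String.ofList (digBfin (mens.toList.foldl digBstep ([], none)))

-- ===== PRECONDITION & SPEC =====
def Spec_digramas (mens : String) (out : String) : Prop := out = digramas_alt mens
instance (mens : String) (out : String) : Decidable (Spec_digramas mens out) := by unfold Spec_digramas; infer_instance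

-- ===== CLAIM (what is proved, stated in full; the proofs are below) =====
def Claim_equal_digramas : Prop := ∀ (mens : String), Dom_digramas mens → Spec_digramas mens (digramas mens)

-- ===== LEMMAS AND PROOFS =====

-- canonical digram transform without final padding
def pairsN : List Char → List Char
  | [] => []
  | [a] => [a]
  | a :: b :: t => if a == b then a :: 'X' :: pairsN (b :: t) else a :: b :: pairsN t

-- canonical digram transform with final padding
def pairsP : List Char → List Char
  | [] => []
  | [a] => [a, 'X']
  | a :: b :: t => if a == b then a :: 'X' :: pairsP (b :: t) else a :: b :: pairsP t

theorem digAstrip_eq_filter (l : List Char) :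
    digAstrip l = l.filter (fun c => !(c == ' ')) := by
  have h : ∀ (l acc : List Char),
      l.foldl (fun acc c => if c == ' ' then acc else acc ++ [c]) acc
        = acc ++ l.filter (fun c => !(c == ' ')) := by
    intro l
    induction l with
    | nil => simp
    | cons c t ih =>
      intro acc
      by_cases hc : (c == ' ') = true
      · rw [List.foldl_cons, if_pos hc, ih, List.filter_cons]
        simp [hc]
      · rw [List.foldl_cons, if_neg hc, ih, List.filter_cons]
        simp [hc]
  simpa [digAstrip] using h l []

theorem getD_append_length (l r : List Char) (k : Nat) (d : Char) :
    (l ++ r).getD (l.length + k) d = r.getD k d := by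
  induction l with
  | nil => simp
  | cons a t ih => simpa [Nat.succ_add] using ih

theorem take_append_length (l r : List Char) (k : Nat) :
    (l ++ r).take (l.length + k) = l ++ r.take k := by
  induction l with
  | nil => simp
  | cons a t ih => simpa [Nat.succ_add] using ih

theorem drop_append_length (l r : List Char) (k : Nat) :
    (l ++ r).drop (l.length + k) = r.drop k := by
  induction l with
  | nil => simp
  | cons a t ih => simpa [Nat.succ_add] using ih

theorem digAloop_pairsN (rest : List Char) :
    ∀ done : List Char, digAloop (done ++ rest) (done.length + 1) = done ++ pairsN rest := by
  induction rest using pairsN.induct with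
  | case1 =>
    intro done
    rw [digAloop]
    simp [pairsN]
  | case2 a =>
    intro done
    rw [digAloop]
    simp [pairsN]
  | case3 a b t heq ih =>
    intro done
    rw [digAloop]
    have hlen : done.length + 1 < (done ++ a :: b :: t).length := by
      simp only [List.length_append, List.length_cons]; omega
    have h1 : (done ++ a :: b :: t).getD (done.length + 1) ' ' = b := by
      simpa using getD_append_length done (a :: b :: t) 1 ' '
    have h0 : (done ++ a :: b :: t).getD (done.length + 1 - 1) ' ' = a := by
      simpa using getD_append_length done (a :: b :: t) 0 ' '
    have ht : (done ++ a :: b :: t).take (done.length + 1) = done ++ [a] := by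
      simpa using take_append_length done (a :: b :: t) 1
    have hd : (done ++ a :: b :: t).drop (done.length + 1) = b :: t := by
      simpa using drop_append_length done (a :: b :: t) 1
    have hba : (b == a) = true := beq_iff_eq.mpr (beq_iff_eq.mp heq).symm
    rw [dif_pos hlen, h1, h0, if_pos hba, ht, hd]
    rw [show done ++ [a] ++ 'X' :: b :: t = (done ++ [a, 'X']) ++ (b :: t) by simp,
        show done.length + 1 + 2 = (done ++ [a, 'X']).length + 1 by simp,
        ih (done ++ [a, 'X'])]
    simp [pairsN, heq]
  | case4 a b t heq ih =>
    intro done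
    rw [digAloop]
    have hlen : done.length + 1 < (done ++ a :: b :: t).length := by
      simp only [List.length_append, List.length_cons]; omega
    have h1 : (done ++ a :: b :: t).getD (done.length + 1) ' ' = b := by
      simpa using getD_append_length done (a :: b :: t) 1 ' '
    have h0 : (done ++ a :: b :: t).getD (done.length + 1 - 1) ' ' = a := by
      simpa using getD_append_length done (a :: b :: t) 0 ' '
    have hba : ¬ (b == a) = true := by
      simp only [beq_iff_eq] at heq ⊢; exact fun h => heq h.symm
    rw [dif_pos hlen, h1, h0, if_neg hba]
    rw [show done ++ a :: b :: t = (done ++ [a, b]) ++ t by simp,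
        show done.length + 1 + 2 = (done ++ [a, b]).length + 1 by simp,
        ih (done ++ [a, b])]
    simp [pairsN, heq]

-- padding: pairsN plus the final X-if-odd step equals pairsP
theorem pairsN_pad (l : List Char) :
    digApad (pairsN l) = pairsP l := by
  induction l using pairsN.induct with
  | case1 => simp [pairsN, pairsP, digApad]
  | case2 a => simp [pairsN, pairsP, digApad]
  | case3 a b t heq ih =>
    simp only [pairsN, pairsP, if_pos heq, digApad] at *
    by_cases h : (pairsN (b :: t)).length % 2 = 0
    · rw [if_neg (by omega)] at ih
      rw [if_neg (by simp only [List.length_cons]; omega), ih]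
    · rw [if_pos (by omega)] at ih
      rw [if_pos (by simp only [List.length_cons]; omega), ← ih]
      simp
  | case4 a b t heq ih =>
    simp only [pairsN, pairsP, if_neg heq, digApad] at *
    by_cases h : (pairsN t).length % 2 = 0
    · rw [if_neg (by omega)] at ih
      rw [if_neg (by simp only [List.length_cons]; omega), ih]
    · rw [if_pos (by omega)] at ih
      rw [if_pos (by simp only [List.length_cons]; omega), ← ih]
      simp

-- B's fold ignores spaces
theorem digB_fold_filter (l : List Char) (st : List Char × Option Char) :
    l.foldl digBstep st = (l.filter (fun c => !(c == ' '))).foldl digBstep st := by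
  induction l generalizing st with
  | nil => rfl
  | cons c t ih =>
    by_cases hc : c = ' '
    · simp [List.foldl, hc, digBstep, ih]
    · simp [List.foldl, hc, ih]

-- B's state machine computes pairsP on space-free input
theorem digB_pairsP (l : List Char) (hl : ∀ c ∈ l, ¬ c = ' ') :
    (∀ out, digBfin (l.foldl digBstep (out, none)) = out ++ pairsP l) ∧
    (∀ out p, digBfin (l.foldl digBstep (out, some p)) = out ++ pairsP (p :: l)) := by
  induction l with
  | nil => constructor <;> intros <;> simp [digBfin, pairsP]
  | cons c t ih =>
    have hc : ¬ c = ' ' := hl c (by simp)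
    have iht := ih (fun x hx => hl x (by simp [hx]))
    constructor
    · intro out
      simp only [List.foldl, digBstep]
      rw [if_neg (by simpa using hc)]
      exact iht.2 out c
    · intro out p
      simp only [List.foldl, digBstep]
      rw [if_neg (by simpa using hc)]
      by_cases hp : p = c
      · subst hp
        rw [show (if (p == p) = true then ((out, some p).1 ++ [p, 'X'], some p)
              else ((out, some p).1 ++ [p, p], none)) = (out ++ [p, 'X'], some p) by simp]
        rw [iht.2 (out ++ [p, 'X']) p]
        simp [pairsP]
      · rw [show (if (p == c) = true then ((out, some p).1 ++ [p, 'X'], some c)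
              else ((out, some p).1 ++ [p, c], none)) = (out ++ [p, c], none) by
            rw [if_neg (by simpa using hp)]]
        rw [iht.1 (out ++ [p, c])]
        simp [pairsP, beq_iff_eq, hp]

-- ===== VERDICT (by name: the statement is the Claim_ definition above) =====
theorem digramas_spec : Claim_equal_digramas := by
  intro mens _
  unfold Spec_digramas digramas digramas_alt
  have hA : digAloop (digAstrip mens.toList) 1
      = pairsN (mens.toList.filter (fun c => !(c == ' '))) := by
    rw [digAstrip_eq_filter]
    simpa using digAloop_pairsN (mens.toList.filter (fun c => !(c == ' '))) []
  have hB : digBfin (mens.toList.foldl digBstep ([], none))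
      = pairsP (mens.toList.filter (fun c => !(c == ' '))) := by
    rw [digB_fold_filter]
    have := (digB_pairsP (mens.toList.filter (fun c => !(c == ' ')))
      (by intro c hc; simp only [List.mem_filter, Bool.not_eq_eq_eq_not, Bool.not_true,
            beq_eq_false_iff_ne, ne_eq] at hc; exact hc.2)).1 []
    simpa using this
  rw [hA, hB, pairsN_pad]
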